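-- pv_equiv track=rewrite | github.com/boqigao/japanese-madori-ai-planner | plan_engine/preflight/wet.py | _can_pack_connected_wet_modules
-- ===== SOURCE A (Python) =====
-- def _can_pack_connected_wet_modules(
--     modules: list[tuple[int, int]],
--     envelope_w: int,
--     envelope_h: int,
-- ) -> bool:
--     """Return True when fixed-size wet modules can be arranged as one connected cluster.
--
--     This is a small deterministic search over grid-aligned placements. It is
--     only used for early rejection and runs on tiny module counts.
--     """
--     modules = sorted(modules, reverse=True)
--     placed: list[tuple[int, int, int, int]] = []
--     seen_states: set[tuple[tuple[int, int, int, int], ...]] = set()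
--
--     def normalize(rects: list[tuple[int, int, int, int]]) -> tuple[tuple[int, int, int, int], ...]:
--         min_x = min(r[0] for r in rects)
--         min_y = min(r[1] for r in rects)
--         normalized = sorted((x - min_x, y - min_y, w, h) for x, y, w, h in rects)
--         return tuple(normalized)
--
--     def bbox(rects: list[tuple[int, int, int, int]]) -> tuple[int, int]:
--         min_x = min(r[0] for r in rects)
--         min_y = min(r[1] for r in rects)
--         max_x = max(r[0] + r[2] for r in rects)
--         max_y = max(r[1] + r[3] for r in rects)
--         return max_x - min_x, max_y - min_y
--
--     def overlaps(rect: tuple[int, int, int, int], others: list[tuple[int, int, int, int]]) -> bool: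
--         rx, ry, rw, rh = rect
--         return any(not (rx + rw <= ox or ox + ow <= rx or ry + rh <= oy or oy + oh <= ry) for ox, oy, ow, oh in others)
--
--     def candidate_positions(module: tuple[int, int]) -> list[tuple[int, int]]:
--         if not placed:
--             return [(0, 0)]
--         w, h = module
--         positions: set[tuple[int, int]] = set()
--         for px, py, pw, ph in placed:
--             # Left/right touching candidates.
--             for y in range(py - h + 1, py + ph):
--                 positions.add((px - w, y))
--                 positions.add((px + pw, y))
--             # Top/bottom touching candidates.
--             for x in range(px - w + 1, px + pw):
--                 positions.add((x, py - h))
--                 positions.add((x, py + ph))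
--         return list(positions)
--
--     def dfs(index: int) -> bool:
--         if index == len(modules):
--             bw, bh = bbox(placed)
--             return bw <= envelope_w and bh <= envelope_h
--
--         module = modules[index]
--         for x, y in candidate_positions(module):
--             rect = (x, y, module[0], module[1])
--             if overlaps(rect, placed):
--                 continue
--             trial = [*placed, rect]
--             bw, bh = bbox(trial)
--             if bw > envelope_w or bh > envelope_h:
--                 continue
--             state = normalize(trial)
--             if state in seen_states:
--                 continue
--             seen_states.add(state)
--             placed.append(rect)
--             if dfs(index + 1):
--                 return True
--             placed.pop()
--         return False
--
--     return dfs(0)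
-- ===== SOURCE B (Python) =====
-- def _can_pack_connected_wet_modules(
--     modules: list[tuple[int, int]],
--     envelope_w: int,
--     envelope_h: int,
-- ) -> bool:
--     """Iterative re-implementation: explicit stack of search states instead of recursion."""
--     modules = sorted(modules, reverse=True)
--     n = len(modules)
--     seen_states = set()
--
--     def normalize(rects):
--         min_x = min(r[0] for r in rects)
--         min_y = min(r[1] for r in rects)
--         return tuple(sorted((x - min_x, y - min_y, w, h) for x, y, w, h in rects))
--
--     def bbox(rects):
--         min_x = min(r[0] for r in rects)
--         min_y = min(r[1] for r in rects)
--         max_x = max(r[0] + r[2] for r in rects)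
--         max_y = max(r[1] + r[3] for r in rects)
--         return max_x - min_x, max_y - min_y
--
--     def overlaps(rect, others):
--         rx, ry, rw, rh = rect
--         return any(not (rx + rw <= ox or ox + ow <= rx or ry + rh <= oy or oy + oh <= ry)
--                    for ox, oy, ow, oh in others)
--
--     def candidate_positions(module, placed):
--         if not placed:
--             return [(0, 0)]
--         w, h = module
--         positions = set()
--         for px, py, pw, ph in placed:
--             for y in range(py - h + 1, py + ph):
--                 positions.add((px - w, y))
--                 positions.add((px + pw, y))
--             for x in range(px - w + 1, px + pw):
--                 positions.add((x, py - h))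
--                 positions.add((x, py + ph))
--         return list(positions)
--
--     # Each stack entry owns its placement list: (index, placed, pending candidates or None).
--     stack = [(0, [], None)]
--     while stack:
--         index, placed, pending = stack.pop()
--         if pending is None:
--             if index == n:
--                 bw, bh = bbox(placed)
--                 if bw <= envelope_w and bh <= envelope_h:
--                     return True
--                 continue
--             pending = candidate_positions(modules[index], placed)
--         if not pending:
--             continue
--         (x, y), rest = pending[0], pending[1:]
--         stack.append((index, placed, rest))
--         module = modules[index]
--         rect = (x, y, module[0], module[1])
--         if overlaps(rect, placed):
--             continue
--         trial = placed + [rect]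
--         bw, bh = bbox(trial)
--         if bw > envelope_w or bh > envelope_h:
--             continue
--         state = normalize(trial)
--         if state in seen_states:
--             continue
--         seen_states.add(state)
--         stack.append((index + 1, trial, None))
--     return False
-- ===== Notes on version B (the rewrite author's own statement) =====
-- stated objective: alternative
-- what changed: Replaces the recursive backtracking dfs (shared mutable placed list, recursion on module index) by an iterative explicit-stack worklist search whose entries each own their placement list and pending candidate positions; the normalize/bbox/overlaps/candidate_positions helpers and the seen-state pruning are kept identical, so cost is the same.
import Mathlib
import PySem

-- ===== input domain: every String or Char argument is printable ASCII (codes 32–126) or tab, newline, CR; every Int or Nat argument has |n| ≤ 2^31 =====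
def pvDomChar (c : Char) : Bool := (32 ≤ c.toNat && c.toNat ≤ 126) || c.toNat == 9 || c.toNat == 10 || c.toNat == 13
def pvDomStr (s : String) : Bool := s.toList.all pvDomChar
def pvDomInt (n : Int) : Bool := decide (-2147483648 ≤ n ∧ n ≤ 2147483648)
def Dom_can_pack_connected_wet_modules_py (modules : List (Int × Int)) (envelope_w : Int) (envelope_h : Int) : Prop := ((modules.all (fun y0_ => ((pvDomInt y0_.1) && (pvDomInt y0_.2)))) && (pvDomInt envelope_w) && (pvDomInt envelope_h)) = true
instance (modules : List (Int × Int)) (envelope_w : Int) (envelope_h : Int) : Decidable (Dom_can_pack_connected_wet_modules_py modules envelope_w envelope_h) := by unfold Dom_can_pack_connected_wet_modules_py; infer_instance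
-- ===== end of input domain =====

-- B replaces A's recursive backtracking dfs by an explicit stack of search states (iterative
-- worklist loop, each entry owning its placement list and pending candidates); the
-- normalize/bbox/overlaps/candidate_positions helpers and the pruning are identical.
-- Equivalence is about the RETURN value only (neither version mutates its arguments).

-- ===== SHARED HELPERS (the four inner helper functions, identical in Source A and Source B) =====

-- key for Python's lexicographic tuple comparison on 4-tuples
def pvKey4 (r : Int × Int × Int × Int) : Lex (Int × Lex (Int × Lex (Int × Int))) :=
  toLex (r.1, toLex (r.2.1, toLex (r.2.2.1, r.2.2.2)))

-- normalize(rects): shift to min corner, sorted tuple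
def pvNormalize (rects : List (Int × Int × Int × Int)) : List (Int × Int × Int × Int) :=
  let mx := (PySem.List.min? (rects.map fun r : Int × Int × Int × Int => r.1) (fun x : Int => x)).getD 0
  let my := (PySem.List.min? (rects.map fun r : Int × Int × Int × Int => r.2.1) (fun x : Int => x)).getD 0
  PySem.List.sorted (rects.map fun r => (r.1 - mx, r.2.1 - my, r.2.2.1, r.2.2.2)) pvKey4 false

-- bbox(rects); Python raises on [] (only reachable when modules == [], excluded by Pre_)
def pvBbox (rects : List (Int × Int × Int × Int)) : Int × Int :=
  let mx := (PySem.List.min? (rects.map fun r : Int × Int × Int × Int => r.1) (fun x : Int => x)).getD 0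
  let my := (PySem.List.min? (rects.map fun r : Int × Int × Int × Int => r.2.1) (fun x : Int => x)).getD 0
  let Mx := (PySem.List.max? (rects.map fun r : Int × Int × Int × Int => r.1 + r.2.2.1) (fun x : Int => x)).getD 0
  let My := (PySem.List.max? (rects.map fun r : Int × Int × Int × Int => r.2.1 + r.2.2.2) (fun x : Int => x)).getD 0
  (Mx - mx, My - my)

-- overlaps(rect, others)
def pvOverlaps (rect : Int × Int × Int × Int) (others : List (Int × Int × Int × Int)) : Bool :=
  others.any fun o =>
    !(decide (rect.1 + rect.2.2.1 ≤ o.1) || decide (o.1 + o.2.2.1 ≤ rect.1) ||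
      decide (rect.2.1 + rect.2.2.2 ≤ o.2.1) || decide (o.2.1 + o.2.2.2 ≤ rect.2.1))

-- candidate_positions(module) over the current placed list (returned as the set's insertion-order list)
def pvCandidates (m : Int × Int) (placed : List (Int × Int × Int × Int)) : List (Int × Int) :=
  match placed with
  | [] => [(0, 0)]
  | _ =>
    placed.foldl (fun s p =>
      let s := (PySem.List.pyRange (p.2.1 - m.2 + 1) (p.2.1 + p.2.2.2) 1).foldl
        (fun s y => PySem.Set.add (PySem.Set.add s (p.1 - m.1, y)) (p.1 + p.2.2.1, y)) s
      (PySem.List.pyRange (p.1 - m.1 + 1) (p.1 + p.2.2.1) 1).foldl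
        (fun s x => PySem.Set.add (PySem.Set.add s (x, p.2.1 - m.2)) (x, p.2.1 + p.2.2.2)) s)
      (PySem.Set.empty : PySem.Set (Int × Int))

-- ===== PORT A ===== (recursive dfs; pvGoA is the `for x, y in candidate_positions(...)` loop,
-- taking the recursive call dfs(index+1) as the continuation `check`; seen_states is threaded)
def pvGoA (check : List (Int × Int × Int × Int) → List (List (Int × Int × Int × Int)) → Bool × List (List (Int × Int × Int × Int)))
    (ew eh : Int) (m : Int × Int) (placed : List (Int × Int × Int × Int)) :
    List (Int × Int) → List (List (Int × Int × Int × Int)) → Bool × List (List (Int × Int × Int × Int))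
  | [], seen => (false, seen)
  | c :: cs, seen =>
    let rect : Int × Int × Int × Int := (c.1, c.2, m.1, m.2)
    if pvOverlaps rect placed then pvGoA check ew eh m placed cs seen
    else
      let trial := placed ++ [rect]
      let bb := pvBbox trial
      if bb.1 > ew || bb.2 > eh then pvGoA check ew eh m placed cs seen
      else
        let st := pvNormalize trial
        if st ∈ seen then pvGoA check ew eh m placed cs seen
        else
          let res := check trial (PySem.Set.add seen st)
          if res.1 then (true, res.2) else pvGoA check ew eh m placed cs res.2

-- dfs(index); recursion on `r` = number of modules still to place (index == n is r == 0)
def pvDfsA (mods : List (Int × Int)) (ew eh : Int) :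
    Nat → Int → List (Int × Int × Int × Int) → List (List (Int × Int × Int × Int)) →
    Bool × List (List (Int × Int × Int × Int))
  | 0, _, placed, seen =>
    let bb := pvBbox placed
    (decide (bb.1 ≤ ew) && decide (bb.2 ≤ eh), seen)
  | (r+1), idx, placed, seen =>
    let m := (PySem.List.pyGet? mods idx).getD (0, 0)
    pvGoA (fun trial s => pvDfsA mods ew eh r (idx + 1) trial s) ew eh m placed
      (pvCandidates m placed) seen

def can_pack_connected_wet_modules_py (modules : List (Int × Int)) (envelope_w : Int) (envelope_h : Int) : Bool :=
  let mods := PySem.List.sorted modules (fun p => toLex p) true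
  (pvDfsA mods envelope_w envelope_h mods.length 0 [] PySem.Set.empty).1

-- ===== PORT B ===== (explicit stack of frames (remaining, index, placed, pending);
-- pending = none means the frame is not yet expanded; `remaining` mirrors n - index)

-- termination measure for the worklist loop
def pvPhi (mods : List (Int × Int)) : Nat → Int → List (Int × Int × Int × Int) → Nat
  | 0, _, _ => 1
  | (r+1), idx, placed =>
    let m := (PySem.List.pyGet? mods idx).getD (0, 0)
    2 + ((pvCandidates m placed).map
      (fun c => 1 + pvPhi mods r (idx + 1) (placed ++ [(c.1, c.2, m.1, m.2)]))).sum

def pvPhiFrame (mods : List (Int × Int)) :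
    Nat × Int × List (Int × Int × Int × Int) × Option (List (Int × Int)) → Nat
  | (r, idx, placed, none) => pvPhi mods r idx placed
  | (r, idx, placed, some pending) =>
    let m := (PySem.List.pyGet? mods idx).getD (0, 0)
    1 + (pending.map
      (fun c => 1 + pvPhi mods (r - 1) (idx + 1) (placed ++ [(c.1, c.2, m.1, m.2)]))).sum

def pvRunB (mods : List (Int × Int)) (ew eh : Int) :
    List (Nat × Int × List (Int × Int × Int × Int) × Option (List (Int × Int))) →
    List (List (Int × Int × Int × Int)) → Bool
  | [], _ => false
  | (0, _, placed, none) :: stack, seen =>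
    let bb := pvBbox placed
    if decide (bb.1 ≤ ew) && decide (bb.2 ≤ eh) then true else pvRunB mods ew eh stack seen
  | (r+1, idx, placed, none) :: stack, seen =>
    let m := (PySem.List.pyGet? mods idx).getD (0, 0)
    pvRunB mods ew eh ((r+1, idx, placed, some (pvCandidates m placed)) :: stack) seen
  | (_, _, _, some []) :: stack, seen => pvRunB mods ew eh stack seen
  | (0, _, _, some (_ :: _)) :: stack, seen => pvRunB mods ew eh stack seen  -- unreachable: expanded frames keep remaining ≥ 1
  | (r'+1, idx, placed, some (c :: rest)) :: stack, seen =>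
    let stack' := (r'+1, idx, placed, some rest) :: stack
    let m := (PySem.List.pyGet? mods idx).getD (0, 0)
    let rect : Int × Int × Int × Int := (c.1, c.2, m.1, m.2)
    if pvOverlaps rect placed then pvRunB mods ew eh stack' seen
    else
      let trial := placed ++ [rect]
      let bb := pvBbox trial
      if bb.1 > ew || bb.2 > eh then pvRunB mods ew eh stack' seen
      else
        let st := pvNormalize trial
        if st ∈ seen then pvRunB mods ew eh stack' seen
        else pvRunB mods ew eh ((r', idx + 1, trial, none) :: stack') (PySem.Set.add seen st)
  termination_by stack _ => (stack.map (pvPhiFrame mods)).sum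
  decreasing_by
  all_goals simp_all [pvPhiFrame, pvPhi, List.map_cons, List.sum_cons]
  all_goals omega

def can_pack_connected_wet_modules_py_alt (modules : List (Int × Int)) (envelope_w : Int) (envelope_h : Int) : Bool :=
  let mods := PySem.List.sorted modules (fun p => toLex p) true
  pvRunB mods envelope_w envelope_h [(mods.length, 0, [], none)] PySem.Set.empty

-- ===== PRECONDITION & SPEC =====
-- Pre_ excludes the empty module list, on which the Python (both A and B) raises ValueError
-- (min() of an empty sequence inside bbox).
def Pre_can_pack_connected_wet_modules_py (modules : List (Int × Int)) (envelope_w : Int) (envelope_h : Int) : Prop := modules ≠ []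
instance (modules : List (Int × Int)) (envelope_w : Int) (envelope_h : Int) : Decidable (Pre_can_pack_connected_wet_modules_py modules envelope_w envelope_h) := by unfold Pre_can_pack_connected_wet_modules_py; infer_instance

def pvWitness_can_pack_connected_wet_modules_py : (List (Int × Int)) × Int × Int := ([(1, 1)], 1, 1)

def Spec_can_pack_connected_wet_modules_py (modules : List (Int × Int)) (envelope_w : Int) (envelope_h : Int) (out : Bool) : Prop := out = can_pack_connected_wet_modules_py_alt modules envelope_w envelope_h
instance (modules : List (Int × Int)) (envelope_w : Int) (envelope_h : Int) (out : Bool) : Decidable (Spec_can_pack_connected_wet_modules_py modules envelope_w envelope_h out) := by unfold Spec_can_pack_connected_wet_modules_py; infer_instance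

-- ===== CLAIM (what is proved, stated in full; the proofs are below) =====
def Claim_equal_can_pack_connected_wet_modules_py : Prop := ∀ (modules : List (Int × Int)) (envelope_w : Int) (envelope_h : Int), Dom_can_pack_connected_wet_modules_py modules envelope_w envelope_h → Pre_can_pack_connected_wet_modules_py modules envelope_w envelope_h → Spec_can_pack_connected_wet_modules_py modules envelope_w envelope_h (can_pack_connected_wet_modules_py modules envelope_w envelope_h)

-- ===== LEMMAS AND PROOFS =====

-- the empty-stack loop returns False
lemma pvRunB_nil (mods : List (Int × Int)) (ew eh : Int) (seen : List (List (Int × Int × Int × Int))) :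
    pvRunB mods ew eh [] seen = false := by
  simp [pvRunB]

-- the candidate loop of an expanded frame behaves as pvGoA with dfs as continuation,
-- given that unexpanded frames at remaining r behave as pvDfsA at r (the outer IH)
lemma pvRunB_simGo (mods : List (Int × Int)) (ew eh : Int) (r : Nat)
    (ih : ∀ (idx : Int) (placed : List (Int × Int × Int × Int))
      (stack : List (Nat × Int × List (Int × Int × Int × Int) × Option (List (Int × Int))))
      (seen : List (List (Int × Int × Int × Int))),
      pvRunB mods ew eh ((r, idx, placed, none) :: stack) seen =
        (if (pvDfsA mods ew eh r idx placed seen).1 then true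
         else pvRunB mods ew eh stack (pvDfsA mods ew eh r idx placed seen).2)) :
    ∀ (cands : List (Int × Int)) (idx : Int) (placed : List (Int × Int × Int × Int))
      (stack : List (Nat × Int × List (Int × Int × Int × Int) × Option (List (Int × Int))))
      (seen : List (List (Int × Int × Int × Int))),
      pvRunB mods ew eh ((r + 1, idx, placed, some cands) :: stack) seen =
        (if (pvGoA (fun t s => pvDfsA mods ew eh r (idx + 1) t s) ew eh
              ((PySem.List.pyGet? mods idx).getD (0, 0)) placed cands seen).1 then true
         else pvRunB mods ew eh stack
           (pvGoA (fun t s => pvDfsA mods ew eh r (idx + 1) t s) ew eh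
              ((PySem.List.pyGet? mods idx).getD (0, 0)) placed cands seen).2) := by
  intro cands
  induction cands with
  | nil =>
    intro idx placed stack seen
    rw [pvRunB]
    simp [pvGoA]
  | cons c rest ihc =>
    intro idx placed stack seen
    rw [pvRunB, pvGoA]
    simp only []
    by_cases h1 : pvOverlaps (c.1, c.2, ((PySem.List.pyGet? mods idx).getD (0, 0)).1,
        ((PySem.List.pyGet? mods idx).getD (0, 0)).2) placed
    · simp only [h1, if_true]
      exact ihc idx placed stack seen
    · simp only [h1, if_false, Bool.false_eq_true]
      by_cases h2 : (decide ((pvBbox (placed ++ [(c.1, c.2, ((PySem.List.pyGet? mods idx).getD (0, 0)).1,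
          ((PySem.List.pyGet? mods idx).getD (0, 0)).2)])).1 > ew) ||
          decide ((pvBbox (placed ++ [(c.1, c.2, ((PySem.List.pyGet? mods idx).getD (0, 0)).1,
          ((PySem.List.pyGet? mods idx).getD (0, 0)).2)])).2 > eh)) = true
      · simp only [h2, if_true]
        exact ihc idx placed stack seen
      · simp only [h2, if_false, Bool.false_eq_true]
        by_cases h3 : pvNormalize (placed ++ [(c.1, c.2, ((PySem.List.pyGet? mods idx).getD (0, 0)).1,
            ((PySem.List.pyGet? mods idx).getD (0, 0)).2)]) ∈ seen
        · simp only [h3, if_true]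
          exact ihc idx placed stack seen
        · simp only [h3, if_false]
          rw [ih]
          rcases hd : (pvDfsA mods ew eh r (idx + 1)
              (placed ++ [(c.1, c.2, ((PySem.List.pyGet? mods idx).getD (0, 0)).1,
                ((PySem.List.pyGet? mods idx).getD (0, 0)).2)])
              (PySem.Set.add seen
                (pvNormalize (placed ++ [(c.1, c.2, ((PySem.List.pyGet? mods idx).getD (0, 0)).1,
                  ((PySem.List.pyGet? mods idx).getD (0, 0)).2)])))) with ⟨b, s2⟩
          cases b
          · simp only [Bool.false_eq_true, if_false]
            exact ihc idx placed stack s2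
          · simp

-- simulation: an unexpanded frame behaves as the recursive dfs call, and on failure the
-- loop resumes the rest of the stack with the seen set dfs left behind
lemma pvRunB_sim (mods : List (Int × Int)) (ew eh : Int) :
    ∀ (r : Nat) (idx : Int) (placed : List (Int × Int × Int × Int))
      (stack : List (Nat × Int × List (Int × Int × Int × Int) × Option (List (Int × Int))))
      (seen : List (List (Int × Int × Int × Int))),
      pvRunB mods ew eh ((r, idx, placed, none) :: stack) seen =
        (if (pvDfsA mods ew eh r idx placed seen).1 then true
         else pvRunB mods ew eh stack (pvDfsA mods ew eh r idx placed seen).2) := by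
  intro r
  induction r with
  | zero =>
    intro idx placed stack seen
    rw [pvRunB]
    simp only [pvDfsA]
  | succ r ih =>
    intro idx placed stack seen
    rw [pvRunB]
    rw [pvRunB_simGo mods ew eh r ih]
    rfl

-- ===== VERDICT (by name: the statement is the Claim_ definition above) =====
theorem can_pack_connected_wet_modules_py_spec : Claim_equal_can_pack_connected_wet_modules_py := by
  intro modules envelope_w envelope_h _hdom _hpre
  unfold Spec_can_pack_connected_wet_modules_py
  unfold can_pack_connected_wet_modules_py can_pack_connected_wet_modules_py_alt
  simp only []
  rw [pvRunB_sim]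
  rw [pvRunB_nil]
  cases h : (pvDfsA (PySem.List.sorted modules (fun p => toLex p) true) envelope_w envelope_h
      (PySem.List.sorted modules (fun p => toLex p) true).length 0 [] PySem.Set.empty).1
  · simp
  · simp
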